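-- pv_equiv track=rewrite | github.com/garyblocks/leetcode | round1/65_ValidNumber.py | isNumber
-- ===== SOURCE A (Python) =====
-- def isNumber(s):
--     s = s.strip()
--     if s=='':
--         return False
--     num={'1','2','3','4','5','6','7','8','9','0'}
--     f,l = True,False
--     punc={'.':True, '+':True, '-':True, 'e':True}
--     i = 0
--     while i<len(s):
--         t = s[i]
--         if t in punc and punc[t]:
--             punc[t]=False
--             if t=='+' or t=='-':
--                 if not f:
--                     return False
--                 else:
--                     punc['+'],punc['-']=False,False
--             elif t=='e':
--                 if f:
--                     return False
--                 punc['.'],punc['+'],punc['-'],f,l=False,True,True,True,True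
--             else:
--                 punc['+'],punc['-']=False,False
--             i+=1
--         elif t in num:
--             if f:
--                 f,l=False,False
--             i+=1
--         else:
--             return False
--     if l or f:
--         return False
--     return True
--     """
--     :type s: str
--     :rtype: bool
--     """
-- ===== SOURCE B (Python) =====
-- def isNumber(s):
--     # Recursive-descent grammar parser: [+-]? digits [. digits] (>=1 mantissa digit) [e [+-]? digits+]
--     t = s.strip()
--     u = t[1:] if t[:1] in ('+', '-') else t
--     return _mantissa(u)
--
-- def _ndigits(s):
--     i = 0
--     while i < len(s) and s[i].isdigit():
--         i += 1
--     return i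
--
-- def _mantissa(u):
--     k = _ndigits(u)
--     m = u[k:]
--     if m[:1] == '.':
--         frac = m[1:]
--         k2 = _ndigits(frac)
--         if k + k2 == 0:
--             return False
--         rest = frac[k2:]
--     else:
--         if k == 0:
--             return False
--         rest = m
--     return rest == '' or _expo(rest)
--
-- def _expo(r):
--     if r[:1] != 'e':
--         return False
--     b = r[1:]
--     b = b[1:] if b[:1] in ('+', '-') else b
--     return b != '' and _ndigits(b) == len(b)
-- ===== Notes on version B (the rewrite author's own statement) =====
-- stated objective: simpler
-- what changed: Replaced A's imperative single-pass state machine over mutable punctuation/digit flags with a declarative recursive-descent parser of the grammar [+-]? digits [. digits] (at least one mantissa digit) followed by an optional lowercase-e exponent with optional sign and mandatory digits.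
import Mathlib
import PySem

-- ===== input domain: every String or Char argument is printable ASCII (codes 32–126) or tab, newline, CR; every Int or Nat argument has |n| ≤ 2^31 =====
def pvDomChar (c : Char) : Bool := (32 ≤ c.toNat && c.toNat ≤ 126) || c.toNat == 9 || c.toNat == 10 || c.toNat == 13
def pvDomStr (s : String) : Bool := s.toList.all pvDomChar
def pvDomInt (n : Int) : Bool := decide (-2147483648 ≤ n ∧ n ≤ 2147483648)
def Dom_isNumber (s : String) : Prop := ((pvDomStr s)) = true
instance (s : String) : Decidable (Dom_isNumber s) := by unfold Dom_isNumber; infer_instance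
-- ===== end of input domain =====

-- B replaces A's mutable-flag state machine with a recursive-descent grammar parser
-- ([+-]? digits [. digits] with >=1 mantissa digit, then an optional 'e'-exponent); objective: simpler.

-- ===== PORT A =====
-- A's while-loop, recursing over the remaining characters; the state is
-- (punc['.'], punc['+'], punc['-'], punc['e'], f, l) of the Python code.
def isNumberLoop (pd pp pm pe f l : Bool) : List Char → Bool
  | [] => !(l || f)                      -- "if l or f: return False / return True"
  | c :: cs =>
    if (c == '.' && pd) || (c == '+' && pp) || (c == '-' && pm) || (c == 'e' && pe) then
      -- punc[t] = False
      let pd1 := if c == '.' then false else pd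
      let pe1 := if c == 'e' then false else pe
      if c == '+' || c == '-' then
        if !f then false
        else isNumberLoop pd1 false false pe1 f l cs
      else if c == 'e' then
        if f then false
        else isNumberLoop false true true pe1 true true cs
      else
        isNumberLoop pd1 false false pe1 f l cs
    else if c == '1' || c == '2' || c == '3' || c == '4' || c == '5' ||
            c == '6' || c == '7' || c == '8' || c == '9' || c == '0' then
      if f then isNumberLoop pd pp pm pe false false cs
      else isNumberLoop pd pp pm pe f l cs
    else false

def isNumber (s : String) : Bool :=
  let t := (PySem.Str.strip s).toList       -- s = s.strip()
  if t == [] then false                     -- if s == '': return False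
  else isNumberLoop true true true true true false t

-- ===== PORT B =====
-- _ndigits: length of the leading run of decimal digits
def ndigitsB : List Char → Nat
  | [] => 0
  | c :: cs => if PySem.Chars.isdigit c then ndigitsB cs + 1 else 0

-- _expo: r is 'e', an optional sign, then one or more digits
-- (python's r[:1], r[1:] on char lists are head?/tail; exact for these indices)
def expoB (r : List Char) : Bool :=
  match r with
  | c :: b0 =>
    if c == 'e' then
      let b := match b0 with
        | c2 :: rest => if c2 == '+' || c2 == '-' then rest else b0
        | [] => b0
      b != [] && ndigitsB b == b.length
    else false
  | [] => false

-- _mantissa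
def mantissaB (u : List Char) : Bool :=
  let k := ndigitsB u
  let m := u.drop k
  if m.head? == some '.' then
    let frac := m.tail
    let k2 := ndigitsB frac
    if k + k2 == 0 then false
    else
      let rest := frac.drop k2
      rest == [] || expoB rest
  else
    if k == 0 then false
    else m == [] || expoB m

def isNumber_alt (s : String) : Bool :=
  let t := (PySem.Str.strip s).toList       -- t = s.strip()
  let u := match t with                     -- u = t[1:] if t[:1] in ('+','-') else t
    | c :: rest => if c == '+' || c == '-' then rest else t
    | [] => t
  mantissaB u

-- ===== PRECONDITION & SPEC =====
def Spec_isNumber (s : String) (out : Bool) : Prop := out = isNumber_alt s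
instance (s : String) (out : Bool) : Decidable (Spec_isNumber s out) := by unfold Spec_isNumber; infer_instance

-- ===== CLAIM (what is proved, stated in full; the proofs are below) =====
def Claim_equal_isNumber : Prop := ∀ (s : String), Dom_isNumber s → Spec_isNumber s (isNumber s)

-- ===== LEMMAS AND PROOFS =====

-- A's digit-set membership test is B's isdigit test
theorem isdigit_eq_memA (c : Char) : (PySem.Chars.isdigit c) = (c == '1' || c == '2' || c == '3' || c == '4' || c == '5' || c == '6' || c == '7' || c == '8' || c == '9' || c == '0') := by
  rw [Bool.eq_iff_iff]
  simp only [PySem.Chars.isdigit, Bool.or_eq_true, beq_iff_eq]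
  simp only [Char.le_def, UInt32.le_iff_toNat_le, Char.ext_iff, UInt32.toNat_inj.symm]
  simp only [Bool.and_eq_true, decide_eq_true_eq]
  simp only [show ('0':Char).val.toNat = 48 from rfl, show ('9':Char).val.toNat = 57 from rfl,
    show ('1':Char).val.toNat = 49 from rfl, show ('2':Char).val.toNat = 50 from rfl,
    show ('3':Char).val.toNat = 51 from rfl, show ('4':Char).val.toNat = 52 from rfl,
    show ('5':Char).val.toNat = 53 from rfl, show ('6':Char).val.toNat = 54 from rfl,
    show ('7':Char).val.toNat = 55 from rfl, show ('8':Char).val.toNat = 56 from rfl]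
  omega

theorem beq_succ_eq (a b : Nat) : (a + 1 == b + 1) = (a == b) := by
  rw [Bool.eq_iff_iff]; simp

@[simp] theorem isdigit_dot : PySem.Chars.isdigit '.' = false := rfl
@[simp] theorem isdigit_e : PySem.Chars.isdigit 'e' = false := rfl
@[simp] theorem isdigit_plus : PySem.Chars.isdigit '+' = false := rfl
@[simp] theorem isdigit_minus : PySem.Chars.isdigit '-' = false := rfl

theorem bne_nil_eq (cs : List Char) : (cs != []) = !decide (cs = []) := by
  rw [Bool.eq_iff_iff]; simp

-- exponent-digit state (after at least one exponent digit): all flags burned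
theorem L_E1 (pp pm : Bool) (cs : List Char) :
    isNumberLoop false pp pm false false false cs = (ndigitsB cs == cs.length) := by
  induction cs generalizing pp pm with
  | nil => rfl
  | cons c cs ih =>
    by_cases hdig : PySem.Chars.isdigit c = true
    · have h2 : (c == '+') = false := by
        rcases eq_or_ne c '+' with rfl|h
        · exact absurd hdig (by decide)
        · simp [h]
      have h3 : (c == '-') = false := by
        rcases eq_or_ne c '-' with rfl|h
        · exact absurd hdig (by decide)
        · simp [h]
      simp [isNumberLoop, ndigitsB, h2, h3, ← isdigit_eq_memA, hdig, ih, beq_succ_eq]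
    · have hd : PySem.Chars.isdigit c = false := by simpa using hdig
      by_cases h2 : c = '+'
      · subst h2; cases pp <;> simp [isNumberLoop, ndigitsB, hd]
      · by_cases h3 : c = '-'
        · subst h3; cases pm <;> simp [isNumberLoop, ndigitsB, hd]
        · simp [isNumberLoop, ndigitsB, hd, ← isdigit_eq_memA, h2, h3]

-- just after the exponent's sign: a nonempty all-digit tail is required
theorem L_E2a (cs : List Char) :
    isNumberLoop false false false false true true cs = (decide (cs ≠ []) && (ndigitsB cs == cs.length)) := by
  cases cs with
  | nil => rfl
  | cons c cs =>
    by_cases hdig : PySem.Chars.isdigit c = true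
    · have h2 : (c == '+') = false := by
        rcases eq_or_ne c '+' with rfl|h
        · exact absurd hdig (by decide)
        · simp [h]
      have h3 : (c == '-') = false := by
        rcases eq_or_ne c '-' with rfl|h
        · exact absurd hdig (by decide)
        · simp [h]
      simp [isNumberLoop, ndigitsB, h2, h3, ← isdigit_eq_memA, hdig, L_E1, beq_succ_eq]
    · have hd : PySem.Chars.isdigit c = false := by simpa using hdig
      simp [isNumberLoop, ndigitsB, hd, ← isdigit_eq_memA]

-- just after 'e': optional sign, then a nonempty all-digit tail — exactly B's _expo after the 'e'
theorem L_E2b (cs : List Char) :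
    isNumberLoop false true true false true true cs = expoB ('e' :: cs) := by
  cases cs with
  | nil => rfl
  | cons c cs =>
    by_cases h2 : c = '+'
    · subst h2; simp [isNumberLoop, expoB, L_E2a, bne_nil_eq]
    · by_cases h3 : c = '-'
      · subst h3; simp [isNumberLoop, expoB, L_E2a, bne_nil_eq]
      · by_cases hdig : PySem.Chars.isdigit c = true
        · simp [isNumberLoop, expoB, ndigitsB, h2, h3, ← isdigit_eq_memA, hdig, L_E1, beq_succ_eq]
        · have hd : PySem.Chars.isdigit c = false := by simpa using hdig
          simp [isNumberLoop, expoB, ndigitsB, hd, ← isdigit_eq_memA, h2, h3]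

-- after the decimal point, at least one digit seen: digits then optional exponent
theorem L_M1 (pp pm : Bool) (cs : List Char) :
    isNumberLoop false pp pm true false false cs =
      (cs.drop (ndigitsB cs) == [] || expoB (cs.drop (ndigitsB cs))) := by
  induction cs generalizing pp pm with
  | nil => rfl
  | cons c cs ih =>
    by_cases he : c = 'e'
    · subst he; simp [isNumberLoop, ndigitsB, L_E2b]
    · by_cases hdig : PySem.Chars.isdigit c = true
      · have h2 : (c == '+') = false := by
          rcases eq_or_ne c '+' with rfl|h
          · exact absurd hdig (by decide)
          · simp [h]
        have h3 : (c == '-') = false := by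
          rcases eq_or_ne c '-' with rfl|h
          · exact absurd hdig (by decide)
          · simp [h]
        simp [isNumberLoop, ndigitsB, h2, h3, he, ← isdigit_eq_memA, hdig, ih]
      · have hd : PySem.Chars.isdigit c = false := by simpa using hdig
        by_cases h2 : c = '+'
        · subst h2; cases pp <;> simp [isNumberLoop, ndigitsB, expoB, hd]
        · by_cases h3 : c = '-'
          · subst h3; cases pm <;> simp [isNumberLoop, ndigitsB, expoB, hd]
          · simp [isNumberLoop, ndigitsB, expoB, hd, ← isdigit_eq_memA, h2, h3, he]

-- before the decimal point, at least one digit seen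
theorem L_M2 (pp pm : Bool) (cs : List Char) :
    isNumberLoop true pp pm true false false cs =
      (let m := cs.drop (ndigitsB cs)
       if m.head? == some '.' then
         (m.tail.drop (ndigitsB m.tail) == [] || expoB (m.tail.drop (ndigitsB m.tail)))
       else (m == [] || expoB m)) := by
  induction cs generalizing pp pm with
  | nil => rfl
  | cons c cs ih =>
    by_cases hdot : c = '.'
    · subst hdot; simp [isNumberLoop, ndigitsB, L_M1]
    · by_cases he : c = 'e'
      · subst he; simp [isNumberLoop, ndigitsB, expoB, L_E2b]
      · by_cases hdig : PySem.Chars.isdigit c = true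
        · have h2 : (c == '+') = false := by
            rcases eq_or_ne c '+' with rfl|h
            · exact absurd hdig (by decide)
            · simp [h]
          have h3 : (c == '-') = false := by
            rcases eq_or_ne c '-' with rfl|h
            · exact absurd hdig (by decide)
            · simp [h]
          simp [isNumberLoop, ndigitsB, h2, h3, hdot, he, ← isdigit_eq_memA, hdig, ih]
        · have hd : PySem.Chars.isdigit c = false := by simpa using hdig
          by_cases h2 : c = '+'
          · subst h2; cases pp <;> simp [isNumberLoop, ndigitsB, expoB, hd]
          · by_cases h3 : c = '-'
            · subst h3; cases pm <;> simp [isNumberLoop, ndigitsB, expoB, hd]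
            · simp [isNumberLoop, ndigitsB, expoB, hd, ← isdigit_eq_memA, h2, h3, he, hdot]

-- after the decimal point, no digit yet: a digit is required before anything else
theorem L_M3 (cs : List Char) :
    isNumberLoop false false false true true false cs =
      (if ndigitsB cs == 0 then false
       else (cs.drop (ndigitsB cs) == [] || expoB (cs.drop (ndigitsB cs)))) := by
  cases cs with
  | nil => rfl
  | cons c cs =>
    by_cases he : c = 'e'
    · subst he; simp [isNumberLoop, ndigitsB]
    · by_cases hdig : PySem.Chars.isdigit c = true
      · simp [isNumberLoop, ndigitsB, he, ← isdigit_eq_memA, hdig, L_M1]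
      · have hd : PySem.Chars.isdigit c = false := by simpa using hdig
        simp [isNumberLoop, ndigitsB, hd, ← isdigit_eq_memA, he]

-- after the optional leading sign: exactly B's _mantissa
theorem L_M4 (cs : List Char) :
    isNumberLoop true false false true true false cs = mantissaB cs := by
  cases cs with
  | nil => rfl
  | cons c cs =>
    by_cases hdot : c = '.'
    · subst hdot
      simp [isNumberLoop, L_M3, mantissaB, ndigitsB]
    · by_cases he : c = 'e'
      · subst he; simp [isNumberLoop, mantissaB, ndigitsB]
      · by_cases hdig : PySem.Chars.isdigit c = true
        · simp [isNumberLoop, mantissaB, ndigitsB, hdot, he, ← isdigit_eq_memA, hdig, L_M2]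
        · have hd : PySem.Chars.isdigit c = false := by simpa using hdig
          simp [isNumberLoop, mantissaB, ndigitsB, hd, ← isdigit_eq_memA, hdot, he]

-- the initial state: A's whole loop equals B after the sign strip
theorem L_top (cs : List Char) :
    isNumberLoop true true true true true false cs =
      mantissaB (match cs with
        | c :: rest => if c == '+' || c == '-' then rest else cs
        | [] => cs) := by
  cases cs with
  | nil => rfl
  | cons c cs =>
    by_cases h2 : c = '+'
    · subst h2; simp [isNumberLoop, L_M4]
    · by_cases h3 : c = '-'
      · subst h3; simp [isNumberLoop, L_M4]
      · by_cases hdot : c = '.'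
        · subst hdot
          simp [isNumberLoop, L_M3, mantissaB, ndigitsB]
        · by_cases he : c = 'e'
          · subst he; simp [isNumberLoop, mantissaB, ndigitsB]
          · by_cases hdig : PySem.Chars.isdigit c = true
            · simp [isNumberLoop, mantissaB, ndigitsB, hdot, he, h2, h3, ← isdigit_eq_memA, hdig, L_M2]
            · have hd : PySem.Chars.isdigit c = false := by simpa using hdig
              simp [isNumberLoop, mantissaB, ndigitsB, hd, ← isdigit_eq_memA, hdot, he, h2, h3]

-- ===== VERDICT (by name: the statement is the Claim_ definition above) =====
theorem isNumber_spec : Claim_equal_isNumber := by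
  intro s _
  unfold Spec_isNumber isNumber isNumber_alt
  cases h : (PySem.Str.strip s).toList with
  | nil => simp [mantissaB, ndigitsB]
  | cons c cs => simp only [L_top]; simp
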